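-- pv_equiv track=rewrite | github.com/jjunohj/coding-test-xuno | 프로그래머스/1/1845. 폰켓몬/폰켓몬.py | solution
-- ===== SOURCE A (Python) =====
-- def solution(nums):
--     answer = []
--
--     for num in nums:
--         if num not in answer:
--             answer.append(num)
--         if len(answer) == len(nums) // 2:
--             break
--
--     return len(answer)
-- ===== SOURCE B (Python) =====
-- def solution(nums):
--     s = sorted(nums)
--     distinct = 0
--     prev = None
--     for v in s:
--         if distinct == 0 or v != prev:
--             distinct += 1
--         prev = v
--     return min(distinct, len(nums) // 2)
-- ===== Notes on version B (the rewrite author's own statement) =====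
-- stated objective: faster
-- what changed: Replaces the quadratic build-a-dedup-list-with-membership-scans-and-break loop by sort-then-one-adjacent-comparison pass, folding the early-break cap into min(distinct, len(nums)//2).
-- intended difference: On single-element lists A returns 1 although the cap len(nums)//2 is 0 (the break check can never fire at 0 after the first append); B returns 0, the intended capped count of pokemon one may pick. — e.g. on solution([7]): A returns 1, B returns 0
import Mathlib
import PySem

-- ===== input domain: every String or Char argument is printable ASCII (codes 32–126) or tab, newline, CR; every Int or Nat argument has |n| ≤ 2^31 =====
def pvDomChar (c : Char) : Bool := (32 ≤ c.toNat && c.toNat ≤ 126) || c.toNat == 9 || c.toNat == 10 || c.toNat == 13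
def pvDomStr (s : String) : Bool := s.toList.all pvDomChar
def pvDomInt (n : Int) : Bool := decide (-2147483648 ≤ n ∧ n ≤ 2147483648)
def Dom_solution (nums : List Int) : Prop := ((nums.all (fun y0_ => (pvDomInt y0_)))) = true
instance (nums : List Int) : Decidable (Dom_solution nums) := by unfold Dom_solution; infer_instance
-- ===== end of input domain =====

-- B replaces A's quadratic dedup-list-with-membership-scans loop by sort + one adjacent-comparison
-- pass, capping with min(distinct, len(nums)//2); objective: faster (asymptotic, O(n log n) vs O(n^2)).

-- ===== PORT A =====
-- the for-loop with break: state is the 'answer' list; stop when its length reaches half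
def solGo (half : Int) : List Int → List Int → List Int
  | [], answer => answer
  | num :: rest, answer =>
    let answer' := if num ∈ answer then answer else answer ++ [num]
    if (answer'.length : Int) = half then answer' else solGo half rest answer'

def solution (nums : List Int) : Int :=
  ((solGo (PySem.Int.floordiv (nums.length : Int) 2) nums []).length : Int)

-- ===== PORT B =====
-- the loop body: if distinct == 0 or v != prev: distinct += 1; prev = v
def altStep (st : Int × Option Int) (v : Int) : Int × Option Int :=
  if st.1 = 0 ∨ st.2 ≠ some v then (st.1 + 1, some v) else (st.1, some v)

def solution_alt (nums : List Int) : Int :=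
  let s := PySem.List.sorted nums (fun x => x) false
  min ((s.foldl altStep ((0 : Int), (none : Option Int))).1)
      (PySem.Int.floordiv (nums.length : Int) 2)

-- ===== PRECONDITION & SPEC =====
-- On single-element lists A returns 1 although the cap len(nums)//2 is 0 (A's break check can
-- never fire at 0 after the first append); B returns 0, the intended capped count.
def D_solution (nums : List Int) : Prop := nums.length = 1
instance (nums : List Int) : Decidable (D_solution nums) := by unfold D_solution; infer_instance

def Spec_solution (nums : List Int) (out : Int) : Prop := ¬ D_solution nums → out = solution_alt nums
instance (nums : List Int) (out : Int) : Decidable (Spec_solution nums out) := by unfold Spec_solution; infer_instance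

def pvDiffWitness_solution : List Int := [7]
def pvDiffWitnessOut_solution : Int × Int := (1, 0)

-- ===== CLAIM (what is proved, stated in full; the proofs are below) =====
def Claim_unchanged_solution : Prop := ∀ (nums : List Int), Dom_solution nums → Spec_solution nums (solution nums)
def Claim_changed_solution : Prop := Dom_solution (pvDiffWitness_solution) ∧ D_solution (pvDiffWitness_solution) ∧ solution (pvDiffWitness_solution) = pvDiffWitnessOut_solution.1 ∧ solution_alt (pvDiffWitness_solution) = pvDiffWitnessOut_solution.2 ∧ pvDiffWitnessOut_solution.1 ≠ pvDiffWitnessOut_solution.2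
def Claim_exact_solution : Prop := ∀ (nums : List Int), Dom_solution nums → D_solution nums → solution nums ≠ solution_alt nums

-- ===== LEMMAS AND PROOFS =====

-- insertion-order dedup, the value A's loop accumulates when the break never fires
def dd : List Int → List Int → List Int
  | [], acc => acc
  | x :: xs, acc => dd xs (if x ∈ acc then acc else acc ++ [x])

theorem dd_length_le (l acc : List Int) : acc.length ≤ (dd l acc).length := by
  induction l generalizing acc with
  | nil => simp [dd]
  | cons x xs ih =>
    simp only [dd]
    split
    · exact ih acc
    · exact le_trans (by simp) (ih (acc ++ [x]))

theorem dd_nodup_toFinset (l acc : List Int) (h : acc.Nodup) :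
    (dd l acc).Nodup ∧ (dd l acc).toFinset = acc.toFinset ∪ l.toFinset := by
  induction l generalizing acc with
  | nil => simpa [dd] using h
  | cons x xs ih =>
    simp only [dd]
    by_cases hx : x ∈ acc
    · simp only [if_pos hx]
      obtain ⟨h1, h2⟩ := ih acc h
      refine ⟨h1, ?_⟩
      rw [h2]
      ext z
      simp only [List.toFinset_cons, Finset.mem_union, Finset.mem_insert, List.mem_toFinset]
      constructor
      · rintro (hz | hz)
        · exact Or.inl hz
        · exact Or.inr (Or.inr hz)
      · rintro (hz | rfl | hz)
        · exact Or.inl hz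
        · exact Or.inl hx
        · exact Or.inr hz
    · simp only [if_neg hx]
      have hnd : (acc ++ [x]).Nodup := by
        simp only [List.nodup_append, List.nodup_singleton, true_and]
        refine ⟨h, ?_⟩
        intro a ha b hb
        rw [List.mem_singleton] at hb
        subst hb
        exact fun hax => hx (hax ▸ ha)
      obtain ⟨h1, h2⟩ := ih (acc ++ [x]) hnd
      refine ⟨h1, ?_⟩
      rw [h2]
      ext z
      simp only [List.toFinset_append, List.toFinset_cons, Finset.mem_union, Finset.mem_insert,
        List.mem_toFinset, List.toFinset_nil]
      tauto
  
-- A's loop, when the cap is at least 1, computes min(#distinct, cap)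
theorem solGo_min (l : List Int) (half : Int) (acc : List Int)
    (_h1 : 1 ≤ half) (h2 : (acc.length : Int) < half) :
    ((solGo half l acc).length : Int) = min ((dd l acc).length : Int) half := by
  induction l generalizing acc with
  | nil =>
    simp only [solGo, dd]
    omega
  | cons x xs ih =>
    simp only [solGo, dd]
    by_cases hstop : ((if x ∈ acc then acc else acc ++ [x]).length : Int) = half
    · rw [if_pos hstop]
      have := dd_length_le xs (if x ∈ acc then acc else acc ++ [x])
      omega
    · rw [if_neg hstop]
      have hlen : ((if x ∈ acc then acc else acc ++ [x]).length : Int) ≤ (acc.length : Int) + 1 := by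
        split <;> simp
      exact ih _ (by omega)

-- adjacent-change count starting after a first element p
def adj (p : Int) : List Int → Int
  | [] => 0
  | y :: ys => (if y = p then 0 else 1) + adj y ys

theorem foldl_altStep (l : List Int) (d : Int) (p : Int) (hd : 0 ≤ d) :
    (l.foldl altStep (d + 1, some p)).1 = d + 1 + adj p l := by
  induction l generalizing d p with
  | nil => simp [adj]
  | cons y ys ih =>
    simp only [List.foldl_cons, altStep, adj]
    by_cases hy : y = p
    · subst hy
      have : ¬ (d + 1 = 0 ∨ (some y : Option Int) ≠ some y) := by simp; omega
      rw [if_neg this]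
      rw [ih d y hd]
      simp
    · have hcond : (d + 1 = 0 ∨ (some p : Option Int) ≠ some y) :=
        Or.inr (fun hc => hy (Option.some.inj hc).symm)
      rw [if_pos hcond]
      rw [ih (d + 1) y (by omega)]
      rw [if_neg hy]
      ring

theorem adj_sorted (x : Int) (xs : List Int) (h : (x :: xs).Pairwise (· ≤ ·)) :
    adj x xs = ((x :: xs).toFinset.card : Int) - 1 := by
  induction xs generalizing x with
  | nil => simp [adj]
  | cons y ys ih =>
    have hxy : x ≤ y := (List.pairwise_cons.1 h).1 y (by simp)
    have hyys : (y :: ys).Pairwise (· ≤ ·) := (List.pairwise_cons.1 h).2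
    by_cases hy : y = x
    · subst hy
      have hfe : ((y :: y :: ys).toFinset : Finset Int) = (y :: ys).toFinset := by simp
      simp only [adj, hfe, if_true, zero_add]
      exact ih y hyys
    · simp only [adj, if_neg hy]
      rw [ih y hyys]
      have hxlt : x < y := lt_of_le_of_ne hxy (fun hxx => hy hxx.symm)
      have hxnot : x ∉ (y :: ys).toFinset := by
        simp only [List.mem_toFinset, List.mem_cons]
        rintro (rfl | hz)
        · exact hy rfl
        · have : y ≤ x := (List.pairwise_cons.1 hyys).1 x hz
          omega
      have hcard : ((x :: y :: ys).toFinset.card : Int) = ((y :: ys).toFinset.card : Int) + 1 := by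
        rw [show (x :: y :: ys).toFinset = insert x (y :: ys).toFinset from by simp,
          Finset.card_insert_of_notMem hxnot]
        push_cast
        ring
      have hpos : 1 ≤ ((y :: ys).toFinset.card : Int) := by
        have : y ∈ (y :: ys).toFinset := by simp
        have := Finset.card_pos.2 ⟨y, this⟩
        omega
      omega

-- B's distinct count equals the number of distinct values of nums
theorem alt_distinct (nums : List Int) :
    ((PySem.List.sorted nums (fun x => x) false).foldl altStep ((0 : Int), (none : Option Int))).1
      = (nums.toFinset.card : Int) := by
  have hperm : (PySem.List.sorted nums (fun x => x) false).Perm nums := PySem.List.sorted_perm _ _ _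
  have hfin : (PySem.List.sorted nums (fun x => x) false).toFinset = nums.toFinset :=
    List.toFinset_eq_of_perm _ _ hperm
  have hpw : (PySem.List.sorted nums (fun x => x) false).Pairwise (· ≤ ·) := by
    simpa using (PySem.List.sorted_pairwise (xs := nums) (key := fun x => x))
  cases hs : PySem.List.sorted nums (fun x => x) false with
  | nil =>
    rw [hs] at hfin
    simp [← hfin]
  | cons x xs =>
    rw [hs] at hfin hpw
    simp only [List.foldl_cons, altStep]
    simp only [true_or, if_true]
    have := foldl_altStep xs 0 x le_rfl
    rw [show (0:Int) + 1 = 1 from rfl] at this ⊢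
    rw [this, adj_sorted x xs hpw, ← hfin]
    ring

theorem dd_length_eq_card (nums : List Int) :
    ((dd nums []).length : Int) = (nums.toFinset.card : Int) := by
  obtain ⟨h1, h2⟩ := dd_nodup_toFinset nums [] List.nodup_nil
  rw [← List.toFinset_card_of_nodup h1, h2]
  simp

-- ===== VERDICT (by name: the statement is the Claim_ definition above) =====
theorem solution_spec : Claim_unchanged_solution := by
  intro nums _ hD
  match hn : nums with
  | [] => decide
  | [x] => exact absurd rfl hD
  | a :: b :: rest =>
    set l := a :: b :: rest with hl
    have hlen : 2 ≤ l.length := by simp [hl]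
    have hfd : PySem.Int.floordiv (l.length : Int) 2 = (l.length : Int) / 2 :=
      PySem.Int.floordiv_eq_ediv_of_pos (by omega)
    have hhalf : 1 ≤ (l.length : Int) / 2 := by omega
    unfold solution solution_alt
    show ((solGo ((l.length : Int) / 2) l []).length : Int) = _
    rw [solGo_min l _ [] hhalf (by simpa using hhalf), dd_length_eq_card]
    show _ = min ((PySem.List.sorted l (fun x => x) false).foldl altStep
      ((0 : Int), (none : Option Int))).1 ((l.length : Int) / 2)
    rw [alt_distinct]

theorem solution_changed : Claim_changed_solution := by
  unfold Claim_changed_solution; decide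

theorem solution_tight : Claim_exact_solution := by
  intro nums _ hD
  unfold D_solution at hD
  obtain ⟨x, rfl⟩ := List.length_eq_one_iff.1 hD
  have hA : solution [x] = 1 := by
    simp [solution, solGo, PySem.Int.floordiv]
  have hB : solution_alt [x] = 0 := by
    have hs : PySem.List.sorted [x] (fun y => y) false = [x] :=
      PySem.List.sorted_eq_self_of_pairwise [x] (fun y => y) (by simp)
    simp [solution_alt, hs, altStep, PySem.Int.floordiv]
  rw [hA, hB]; decide
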